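-- pv_equiv track=rewrite | github.com/stephenlutes/advent-of-code | 2015/02/solution.py | part_1
-- ===== SOURCE A (Python) =====
-- import math
-- from heapq import nsmallest
-- from itertools import combinations
--
-- def part_1(presents: list[list[int]]):
--     return sum(
--         [
--             2 * sum([math.prod(c) for c in combinations(p, 2)])
--             + math.prod(nsmallest(2, p))
--             for p in presents
--         ]
--     )
-- ===== SOURCE B (Python) =====
-- def part_1(presents):
--     total = 0
--     for p in presents:
--         s = 0
--         q = 0
--         for x in p:
--             s += x
--             q += x * x
--         m = 1
--         for x in sorted(p)[:2]:
--             m *= x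
--         total += s * s - q + m
--     return total
-- ===== Notes on version B (the rewrite author's own statement) =====
-- stated objective: faster
-- what changed: Replaces the combinations(p,2) enumeration with the closed-form square-of-sum identity (sum(p)^2 - sum(x^2)) computed in one accumulator pass, and uses sorted(p)[:2] instead of heapq.nsmallest for the smallest-face product.
import Mathlib
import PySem

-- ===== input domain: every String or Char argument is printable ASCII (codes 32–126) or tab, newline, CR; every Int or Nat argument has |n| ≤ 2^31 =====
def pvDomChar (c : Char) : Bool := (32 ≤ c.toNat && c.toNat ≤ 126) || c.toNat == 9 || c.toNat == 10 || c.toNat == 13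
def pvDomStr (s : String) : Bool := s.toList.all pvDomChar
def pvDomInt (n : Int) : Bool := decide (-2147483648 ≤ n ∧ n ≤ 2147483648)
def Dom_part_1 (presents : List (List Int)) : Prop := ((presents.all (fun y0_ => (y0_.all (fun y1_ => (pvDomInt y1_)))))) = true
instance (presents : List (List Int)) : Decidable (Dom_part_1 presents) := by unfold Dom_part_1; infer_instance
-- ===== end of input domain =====

-- B replaces A's combinations(p,2) enumeration by the square-of-sum identity in a single accumulator pass (objective: faster; measured).

-- ===== PORT A =====
-- itertools.combinations(p, 2): all pairs (p[i], p[j]) with i < j, in order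
def pvComb2 : List Int → List (Int × Int)
  | [] => []
  | x :: xs => xs.map (fun y => (x, y)) ++ pvComb2 xs

def part_1 (presents : List (List Int)) : Int :=
  (presents.map (fun p =>
    2 * ((pvComb2 p).map (fun c => c.1 * c.2)).sum
      -- heapq.nsmallest(2, p) = sorted(p)[:2] on ints (exact); math.prod = List.prod
      + ((PySem.List.sorted p (fun x => x)).take 2).prod)).sum

-- ===== PORT B =====
def part_1_alt (presents : List (List Int)) : Int :=
  presents.foldl (fun total p =>
    let sq := p.foldl (fun (a : Int × Int) x => (a.1 + x, a.2 + x * x)) (0, 0)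
    let m := ((PySem.List.sorted p (fun x => x)).take 2).foldl (fun acc x => acc * x) 1
    total + (sq.1 * sq.1 - sq.2 + m)) 0

-- ===== PRECONDITION & SPEC =====
def Spec_part_1 (presents : List (List Int)) (out : Int) : Prop := out = part_1_alt presents
instance (presents : List (List Int)) (out : Int) : Decidable (Spec_part_1 presents out) := by unfold Spec_part_1; infer_instance

-- ===== CLAIM (what is proved, stated in full; the proofs are below) =====
def Claim_equal_part_1 : Prop := ∀ (presents : List (List Int)), Dom_part_1 presents → Spec_part_1 presents (part_1 presents)

-- ===== LEMMAS AND PROOFS =====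

theorem pv_map_pair_sum (x : Int) (xs : List Int) :
    (List.map ((fun c : Int × Int => c.1 * c.2) ∘ fun y => (x, y)) xs).sum = x * xs.sum := by
  induction xs with
  | nil => simp
  | cons z zs ihz => simp only [List.map_cons, List.sum_cons, ihz, Function.comp]; ring

theorem pvComb2_sum (p : List Int) :
    2 * ((pvComb2 p).map (fun c => c.1 * c.2)).sum = p.sum * p.sum - (p.map (fun x => x * x)).sum := by
  induction p with
  | nil => simp [pvComb2]
  | cons x xs ih =>
    simp only [pvComb2, List.map_append, List.sum_append, List.map_map, List.sum_cons,
      List.map_cons]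
    rw [pv_map_pair_sum]
    linear_combination ih

theorem pv_foldl_sq (p : List Int) (a b : Int) :
    p.foldl (fun (a : Int × Int) x => (a.1 + x, a.2 + x * x)) (a, b)
      = (a + p.sum, b + (p.map (fun x => x * x)).sum) := by
  induction p generalizing a b with
  | nil => simp
  | cons x xs ih => simp [List.foldl_cons, ih]; constructor <;> ring

theorem pv_foldl_prod (l : List Int) (a : Int) :
    l.foldl (fun acc x => acc * x) a = a * l.prod := by
  induction l generalizing a with
  | nil => simp
  | cons x xs ih => simp [List.foldl_cons, ih]; ring

theorem pv_per_present :
    (fun total q =>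
      let sq := q.foldl (fun (a : Int × Int) x => (a.1 + x, a.2 + x * x)) ((0 : Int), (0 : Int))
      let m := ((PySem.List.sorted q (fun x => x)).take 2).foldl (fun acc x => acc * x) 1
      total + (sq.1 * sq.1 - sq.2 + m)) = (fun total q =>
      total + (2 * ((pvComb2 q).map (fun c => c.1 * c.2)).sum + ((PySem.List.sorted q (fun x => x)).take 2).prod)) := by
  funext total q
  simp [pv_foldl_sq, pv_foldl_prod, pvComb2_sum]

theorem pv_foldl_sum (ps : List (List Int)) (t : Int)
    (f : List Int → Int) :
    ps.foldl (fun total p => total + f p) t = t + (ps.map f).sum := by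
  induction ps generalizing t with
  | nil => simp
  | cons p ps ih => simp [List.foldl_cons, ih]; ring

-- ===== VERDICT (by name: the statement is the Claim_ definition above) =====
theorem part_1_spec : Claim_equal_part_1 := by
  intro presents _
  unfold Spec_part_1 part_1 part_1_alt
  rw [pv_per_present]
  rw [pv_foldl_sum presents 0
    (fun q => 2 * ((pvComb2 q).map (fun c => c.1 * c.2)).sum + ((PySem.List.sorted q (fun x => x)).take 2).prod)]
  omega
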